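-- pv_equiv track=rewrite | github.com/BoxtheMaster/agentics-supplychain | apply_news_shocks_to_graph.py | _tokens_fuzzy_match
-- ===== SOURCE A (Python) =====
-- def _tokens_fuzzy_match(ts1: set[str], ts2: set[str]) -> bool:
--     """
--     Fuzzy overlap between token sets.
--
--     True if:
--       * exact token intersection, OR
--       * substring overlap for tokens length >= 4, OR
--       * common prefix of length >= 4.
--     """
--     # Exact token overlap
--     if ts1.intersection(ts2):
--         return True
--
--     for a in ts1:
--         la = a.lower()
--         for b in ts2:
--             lb = b.lower()
--
--             # substring
--             if len(la) >= 4 and la in lb: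
--                 return True
--             if len(lb) >= 4 and lb in la:
--                 return True
--
--             # common prefix of length >= 4
--             m = min(len(la), len(lb))
--             for k in range(m, 3, -1):
--                 if la[:k] == lb[:k]:
--                     return True
--     return False
-- ===== SOURCE B (Python) =====
-- def _tokens_fuzzy_match(ts1: set[str], ts2: set[str]) -> bool:
--     # Exact token overlap
--     if ts1 & ts2:
--         return True
--
--     # Prefix index: lowercase 4-char prefixes of ts2 tokens of length >= 4,
--     # queried once per ts1 token instead of a countdown loop per pair.
--     prefixes = set()
--     for b in ts2:
--         if len(b) >= 4:
--             prefixes.add(b.lower()[:4])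
--     for a in ts1:
--         if len(a) >= 4 and a.lower()[:4] in prefixes:
--             return True
--
--     # Pairwise substring test
--     for a in ts1:
--         la = a.lower()
--         for b in ts2:
--             lb = b.lower()
--             if len(la) >= 4 and la in lb:
--                 return True
--             if len(lb) >= 4 and lb in la:
--                 return True
--     return False
-- ===== Notes on version B (the rewrite author's own statement) =====
-- stated objective: alternative
-- what changed: The per-pair countdown loop range(min(len),3,-1) comparing prefixes of every length is replaced by a 4-char lowercase prefix index set built once from ts2 and queried once per ts1 token; the intersection guard and the pairwise substring pass are kept.
import Mathlib
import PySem

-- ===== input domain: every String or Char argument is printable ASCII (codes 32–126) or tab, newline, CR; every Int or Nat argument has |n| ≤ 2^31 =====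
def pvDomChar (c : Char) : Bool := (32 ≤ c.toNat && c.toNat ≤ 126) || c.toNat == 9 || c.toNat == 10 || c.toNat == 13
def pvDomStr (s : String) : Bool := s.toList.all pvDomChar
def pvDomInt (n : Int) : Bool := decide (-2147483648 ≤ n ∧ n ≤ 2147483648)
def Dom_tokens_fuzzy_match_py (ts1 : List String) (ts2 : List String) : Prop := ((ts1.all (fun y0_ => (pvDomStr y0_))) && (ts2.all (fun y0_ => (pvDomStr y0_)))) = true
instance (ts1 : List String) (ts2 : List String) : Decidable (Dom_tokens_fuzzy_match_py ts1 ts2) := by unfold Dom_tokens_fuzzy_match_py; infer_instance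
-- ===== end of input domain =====

-- B replaces A's per-pair countdown prefix loop by a prefix-index set built once from ts2
-- and queried per ts1 token; objective: simpler/alternative structure, same results.


-- ===== PORT A =====
-- literal transliteration of A: intersection guard, then the nested loops with the
-- substring tests and the countdown prefix loop range(m, 3, -1); early 'return True'
-- becomes List.any (the result is a Bool, so order of discovery does not matter).
def tokens_fuzzy_match_py (ts1 : List String) (ts2 : List String) : Bool :=
  if ts1.any (fun x => ts2.contains x) then true
  else
    ts1.any (fun a =>
      let la := PySem.Str.lower a
      ts2.any (fun b =>
        let lb := PySem.Str.lower b
        (decide (4 ≤ PySem.Str.len la) && PySem.Str.isIn la lb) ||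
        ((decide (4 ≤ PySem.Str.len lb) && PySem.Str.isIn lb la) ||
         (PySem.List.pyRange (min (PySem.Str.len la) (PySem.Str.len lb)) 3 (-1)).any
           (fun k => PySem.Str.slice la none (some k) == PySem.Str.slice lb none (some k)))))

-- ===== PORT B =====
-- transliteration of Source B: intersection guard; prefix-index set built from ts2 and
-- queried once per ts1 token; then the pairwise substring pass.
def tokens_fuzzy_match_py_alt (ts1 : List String) (ts2 : List String) : Bool :=
  if ts1.any (fun x => ts2.contains x) then true
  else
    let prefixes : PySem.Set String :=
      ts2.foldl (fun s b =>
        if 4 ≤ PySem.Str.len b then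
          PySem.Set.add s (PySem.Str.slice (PySem.Str.lower b) none (some 4))
        else s) PySem.Set.empty
    if ts1.any (fun a =>
        decide (4 ≤ PySem.Str.len a) &&
        prefixes.contains (PySem.Str.slice (PySem.Str.lower a) none (some 4))) then true
    else
      ts1.any (fun a =>
        let la := PySem.Str.lower a
        ts2.any (fun b =>
          let lb := PySem.Str.lower b
          (decide (4 ≤ PySem.Str.len la) && PySem.Str.isIn la lb) ||
          (decide (4 ≤ PySem.Str.len lb) && PySem.Str.isIn lb la)))

-- ===== PRECONDITION & SPEC =====
def Spec_tokens_fuzzy_match_py (ts1 : List String) (ts2 : List String) (out : Bool) : Prop := out = tokens_fuzzy_match_py_alt ts1 ts2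
instance (ts1 : List String) (ts2 : List String) (out : Bool) : Decidable (Spec_tokens_fuzzy_match_py ts1 ts2 out) := by unfold Spec_tokens_fuzzy_match_py; infer_instance

-- ===== CLAIM (what is proved, stated in full; the proofs are below) =====
def Claim_equal_tokens_fuzzy_match_py : Prop := ∀ (ts1 : List String) (ts2 : List String), Dom_tokens_fuzzy_match_py ts1 ts2 → Spec_tokens_fuzzy_match_py ts1 ts2 (tokens_fuzzy_match_py ts1 ts2)

-- ===== LEMMAS AND PROOFS =====

-- lower preserves length
theorem len_lower (s : String) : PySem.Str.len (PySem.Str.lower s) = PySem.Str.len s := by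
  simp [PySem.Str.len_eq, PySem.Str.toList_lower, PySem.Chars.lower]

-- the countdown prefix loop of A is the single 4-prefix comparison
theorem countdown_prefix (la lb : String) :
    ((PySem.List.pyRange (min (PySem.Str.len la) (PySem.Str.len lb)) 3 (-1)).any
       (fun k => PySem.Str.slice la none (some k) == PySem.Str.slice lb none (some k)))
    = (decide (4 ≤ PySem.Str.len la) && (decide (4 ≤ PySem.Str.len lb) &&
       (PySem.Str.slice la none (some 4) == PySem.Str.slice lb none (some 4)))) := by
  rw [Bool.eq_iff_iff]
  simp only [List.any_eq_true, PySem.List.mem_pyRange_neg_one, Bool.and_eq_true,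
    decide_eq_true_eq, beq_iff_eq]
  constructor
  · rintro ⟨k, ⟨hk3, hkmin⟩, heq⟩
    have h0 : (0:Int) ≤ k := by omega
    have hla : 4 ≤ PySem.Str.len la := by omega
    have hlb : 4 ≤ PySem.Str.len lb := by omega
    refine ⟨hla, hlb, ?_⟩
    have heq' : la.toList.take k.toNat = lb.toList.take k.toNat := by
      have := congrArg String.toList heq
      simpa [PySem.Str.toList_slice, PySem.List.slice_to _ h0] using this
    have h4 : la.toList.take 4 = lb.toList.take 4 := by
      have := congrArg (List.take 4) heq'
      have hmin : min 4 k.toNat = 4 := by omega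
      simpa [List.take_take, hmin] using this
    apply String.toList_injective
    simpa [PySem.Str.toList_slice, PySem.List.slice_to _ (by norm_num : (0:Int) ≤ 4)] using h4
  · rintro ⟨hla, hlb, heq⟩
    exact ⟨4, ⟨by omega, by omega⟩, heq⟩

-- membership in B's prefix-index fold
theorem mem_prefix_fold (ts2 : List String) (s : PySem.Set String) (x : String) :
    (x ∈ ts2.foldl (fun s b =>
        if 4 ≤ PySem.Str.len b then
          PySem.Set.add s (PySem.Str.slice (PySem.Str.lower b) none (some 4))
        else s) s)
    ↔ x ∈ s ∨ ∃ b ∈ ts2, 4 ≤ PySem.Str.len b ∧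
        x = PySem.Str.slice (PySem.Str.lower b) none (some 4) := by
  induction ts2 generalizing s with
  | nil => simp
  | cons h t ih =>
    simp only [List.foldl_cons, ih, List.mem_cons]
    split_ifs with hlen
    · rw [PySem.Set.mem_add]
      constructor
      · rintro (⟨hs | hx⟩ | hb)
        · exact Or.inl hs
        · exact Or.inr ⟨h, Or.inl rfl, hlen, hx⟩
        · obtain ⟨b, hb, hb4, hx⟩ := hb
          exact Or.inr ⟨b, Or.inr hb, hb4, hx⟩
      · rintro (hs | ⟨b, (rfl | hb), hb4, hx⟩)
        · exact Or.inl (Or.inl hs)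
        · exact Or.inl (Or.inr hx)
        · exact Or.inr ⟨b, hb, hb4, hx⟩
    · constructor
      · rintro (hs | ⟨b, hb, hb4, hx⟩)
        · exact Or.inl hs
        · exact Or.inr ⟨b, Or.inr hb, hb4, hx⟩
      · rintro (hs | ⟨b, (rfl | hb), hb4, hx⟩)
        · exact Or.inl hs
        · exact absurd hb4 hlen
        · exact Or.inr ⟨b, hb, hb4, hx⟩

-- B's prefix pass equals A's prefix condition spread over the pairs
theorem prefix_pass_eq (ts1 ts2 : List String) :
    (ts1.any (fun a =>
        decide (4 ≤ PySem.Str.len a) &&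
        (ts2.foldl (fun s b =>
          if 4 ≤ PySem.Str.len b then
            PySem.Set.add s (PySem.Str.slice (PySem.Str.lower b) none (some 4))
          else s) PySem.Set.empty).contains
            (PySem.Str.slice (PySem.Str.lower a) none (some 4))))
    = (ts1.any (fun a => ts2.any (fun b =>
        decide (4 ≤ PySem.Str.len (PySem.Str.lower a)) &&
        (decide (4 ≤ PySem.Str.len (PySem.Str.lower b)) &&
         (PySem.Str.slice (PySem.Str.lower a) none (some 4)
            == PySem.Str.slice (PySem.Str.lower b) none (some 4)))))) := by
  rw [Bool.eq_iff_iff]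
  simp only [List.any_eq_true, Bool.and_eq_true, decide_eq_true_eq, beq_iff_eq,
    PySem.Set.contains_iff, len_lower, mem_prefix_fold]
  constructor
  · rintro ⟨a, ha, h4, hmem | hex⟩
    · exact absurd hmem (by simp [PySem.Set.empty])
    · obtain ⟨b, hb, hb4, hx⟩ := hex
      exact ⟨a, ha, b, hb, h4, hb4, hx⟩
  · rintro ⟨a, ha, b, hb, h4, hb4, hx⟩
    exact ⟨a, ha, h4, Or.inr ⟨b, hb, hb4, hx⟩⟩

-- (if c then true else b) = c || b
theorem ite_true_left (c b : Bool) : (if c = true then true else b) = (c || b) := by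
  cases c <;> simp

-- the non-intersection rest of A equals B's prefix pass or'ed with B's substring pass
theorem rest_eq (ts1 ts2 : List String) :
    (ts1.any (fun a =>
      let la := PySem.Str.lower a
      ts2.any (fun b =>
        let lb := PySem.Str.lower b
        (decide (4 ≤ PySem.Str.len la) && PySem.Str.isIn la lb) ||
        ((decide (4 ≤ PySem.Str.len lb) && PySem.Str.isIn lb la) ||
         (PySem.List.pyRange (min (PySem.Str.len la) (PySem.Str.len lb)) 3 (-1)).any
           (fun k => PySem.Str.slice la none (some k) == PySem.Str.slice lb none (some k))))))
    = ((ts1.any (fun a =>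
          decide (4 ≤ PySem.Str.len a) &&
          (ts2.foldl (fun s b =>
            if 4 ≤ PySem.Str.len b then
              PySem.Set.add s (PySem.Str.slice (PySem.Str.lower b) none (some 4))
            else s) PySem.Set.empty).contains
              (PySem.Str.slice (PySem.Str.lower a) none (some 4)))) ||
       (ts1.any (fun a =>
          let la := PySem.Str.lower a
          ts2.any (fun b =>
            let lb := PySem.Str.lower b
            (decide (4 ≤ PySem.Str.len la) && PySem.Str.isIn la lb) ||
            (decide (4 ≤ PySem.Str.len lb) && PySem.Str.isIn lb la))))) := by
  rw [Bool.eq_iff_iff]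
  simp only [countdown_prefix, prefix_pass_eq]
  simp only [Bool.or_eq_true, List.any_eq_true, Bool.and_eq_true]
  constructor
  · rintro ⟨a, ha, b, hb, h⟩
    rcases h with h | h | h
    · exact Or.inr ⟨a, ha, b, hb, Or.inl h⟩
    · exact Or.inr ⟨a, ha, b, hb, Or.inr h⟩
    · exact Or.inl ⟨a, ha, b, hb, h⟩
  · rintro (⟨a, ha, b, hb, h⟩ | ⟨a, ha, b, hb, h | h⟩)
    · exact ⟨a, ha, b, hb, Or.inr (Or.inr h)⟩
    · exact ⟨a, ha, b, hb, Or.inl h⟩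
    · exact ⟨a, ha, b, hb, Or.inr (Or.inl h)⟩

-- ===== VERDICT (by name: the statement is the Claim_ definition above) =====
theorem tokens_fuzzy_match_py_spec : Claim_equal_tokens_fuzzy_match_py := by
  intro ts1 ts2 _
  unfold Spec_tokens_fuzzy_match_py tokens_fuzzy_match_py tokens_fuzzy_match_py_alt
  by_cases hI : ts1.any (fun x => ts2.contains x) = true
  · simp only [hI, if_true]
  · rw [Bool.not_eq_true] at hI
    simp only [hI, Bool.false_eq_true, if_false]
    rw [ite_true_left, rest_eq]
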